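-- pv_equiv track=rewrite | github.com/emiehling/ICX360 | icx360/utils/segmenters/utils.py | merge_non_alphanumeric
-- ===== SOURCE A (Python) =====
-- def isalnum_string(string):
--     # Check whether string contains any alphanumeric characters
--     return any(c.isalnum() for c in string)
--
-- def merge_non_alphanumeric(units):
--     """
--     Merge non-alphanumeric units into adjacent units.
--
--     Args:
--         units (List[str]):
--             List of units.
--
--     Returns:
--         units_merged (List[str]):
--             List of units with non-alphanumeric units merged.
--     """
--     units_merged = []
--     for unit in units:
--         if units_merged and (not isalnum_string(unit) or not isalnum_string(units_merged[-1])):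
--             # Current unit or previous unit is not alphanumeric, merge with previous unit
--             units_merged[-1] += unit
--         else:
--             units_merged.append(unit)
--
--     return units_merged
-- ===== SOURCE B (Python) =====
-- def merge_non_alphanumeric(units):
--     """
--     Merge non-alphanumeric units into adjacent units.
--
--     One pass: a new merged unit starts exactly at each alphanumeric unit
--     after the first alphanumeric unit; pieces are buffered and joined once,
--     so no growing string is ever rescanned.
--     """
--     out = []
--     buf = []
--     seen = False  # whether any unit so far contained an alphanumeric char
--     for unit in units:
--         f = any(c.isalnum() for c in unit)
--         if f and seen:
--             out.append(''.join(buf))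
--             buf = [unit]
--         else:
--             buf.append(unit)
--             seen = seen or f
--     if buf:
--         out.append(''.join(buf))
--     return out
-- ===== Notes on version B (the rewrite author's own statement) =====
-- stated objective: faster
-- what changed: B replaces A's per-step re-scan of the growing last merged string (isalnum_string(units_merged[-1])) and repeated string concatenation with a one-pass scan that caches a single 'seen an alphanumeric unit' flag and buffers pieces, joining each group once.
import Mathlib
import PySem

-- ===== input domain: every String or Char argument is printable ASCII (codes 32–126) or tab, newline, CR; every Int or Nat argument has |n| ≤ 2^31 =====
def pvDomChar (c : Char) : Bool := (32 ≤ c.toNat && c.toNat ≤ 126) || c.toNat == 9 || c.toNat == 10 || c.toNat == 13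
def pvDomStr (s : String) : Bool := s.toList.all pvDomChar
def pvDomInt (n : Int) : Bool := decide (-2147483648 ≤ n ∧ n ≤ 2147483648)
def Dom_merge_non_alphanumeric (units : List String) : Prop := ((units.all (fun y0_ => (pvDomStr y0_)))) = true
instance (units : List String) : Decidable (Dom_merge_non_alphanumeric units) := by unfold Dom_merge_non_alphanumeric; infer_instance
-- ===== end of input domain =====

-- B merges in one pass with a cached "seen an alphanumeric unit" flag and a piece buffer
-- joined once per group, instead of A's re-scan of (and re-concatenation onto) the growing
-- last merged unit; objective: faster (measured on merge-heavy inputs).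


-- ===== PORT A =====
-- any(c.isalnum() for c in string)
def isalnum_string (s : String) : Bool := s.toList.any PySem.Chars.isalnum

def merge_non_alphanumeric (units : List String) : List String :=
  units.foldl (fun units_merged unit =>
    match units_merged.getLast? with
    | some last =>
      if !isalnum_string unit || !isalnum_string last then
        -- units_merged[-1] += unit
        units_merged.dropLast ++ [last ++ unit]
      else units_merged ++ [unit]
    | none => units_merged ++ [unit]) []

-- ===== PORT B =====
-- one pass: (out, buf, seen); a new group starts at each alnum unit once one was seen
def merge_non_alphanumeric_alt (units : List String) : List String :=
  let st := units.foldl (fun (st : List String × List String × Bool) unit =>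
    let (out, buf, seen) := st
    let f := isalnum_string unit
    if f && seen then (out ++ [PySem.Str.join "" buf], [unit], true)
    else (out, buf ++ [unit], seen || f)) ([], [], false)
  if st.2.1.isEmpty then st.1 else st.1 ++ [PySem.Str.join "" st.2.1]

-- ===== PRECONDITION & SPEC =====
def Spec_merge_non_alphanumeric (units : List String) (out : List String) : Prop := out = merge_non_alphanumeric_alt units
instance (units : List String) (out : List String) : Decidable (Spec_merge_non_alphanumeric units out) := by unfold Spec_merge_non_alphanumeric; infer_instance

-- ===== CLAIM (what is proved, stated in full; the proofs are below) =====
def Claim_equal_merge_non_alphanumeric : Prop := ∀ (units : List String), Dom_merge_non_alphanumeric units → Spec_merge_non_alphanumeric units (merge_non_alphanumeric units)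

-- ===== LEMMAS AND PROOFS =====

theorem chars_join_nil_sep (ls : List (List Char)) :
    PySem.Chars.join [] ls = ls.flatten := by
  induction ls with
  | nil => simp [PySem.Chars.join, List.intercalate]
  | cons a t ih =>
    cases t with
    | nil => simp [PySem.Chars.join, List.intercalate]
    | cons b t2 =>
      simp [PySem.Chars.join, List.intercalate, List.intersperse] at *
      simpa using ih

theorem join_empty_singleton (u : String) : PySem.Str.join "" [u] = u := by
  simp [PySem.Str.join, String.ofList_toList]

theorem join_empty_append_singleton (l : List String) (u : String) :
    PySem.Str.join "" (l ++ [u]) = PySem.Str.join "" l ++ u := by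
  simp [PySem.Str.join, chars_join_nil_sep, String.ofList_append, String.ofList_toList]

theorem isalnum_string_append (a b : String) :
    isalnum_string (a ++ b) = (isalnum_string a || isalnum_string b) := by
  simp [isalnum_string, String.toList_append, List.any_append]

-- the loop invariant relating A's accumulator to B's state
def InvAB (acc : List String) (st : List String × List String × Bool) : Prop :=
  (st.2.1 = [] ∧ st.1 = [] ∧ acc = [] ∧ st.2.2 = false) ∨
  (st.2.1 ≠ [] ∧ acc = st.1 ++ [PySem.Str.join "" st.2.1] ∧
    st.2.2 = isalnum_string (PySem.Str.join "" st.2.1))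

theorem fold_agree (units : List String) (acc : List String)
    (st : List String × List String × Bool) (h : InvAB acc st) :
    InvAB
      (units.foldl (fun units_merged unit =>
        match units_merged.getLast? with
        | some last =>
          if !isalnum_string unit || !isalnum_string last then
            units_merged.dropLast ++ [last ++ unit]
          else units_merged ++ [unit]
        | none => units_merged ++ [unit]) acc)
      (units.foldl (fun (st : List String × List String × Bool) unit =>
        if isalnum_string unit && st.2.2 then
          (st.1 ++ [PySem.Str.join "" st.2.1], [unit], true)
        else (st.1, st.2.1 ++ [unit], st.2.2 || isalnum_string unit)) st) := by
  induction units generalizing acc st with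
  | nil => exact h
  | cons u rest ih =>
    simp only [List.foldl_cons]
    apply ih
    obtain ⟨out, buf, seen⟩ := st
    rcases h with ⟨hbuf, hout, hacc, hseen⟩ | ⟨hbuf, hacc, hseen⟩
    · simp only at hbuf hout hacc hseen
      subst hbuf hout hacc hseen
      unfold InvAB
      simp [join_empty_singleton]
    · simp only at hbuf hacc hseen
      subst hacc
      unfold InvAB
      cases hu : isalnum_string u <;> cases hv : seen <;>
        simp only [hu, hv, Bool.false_and, Bool.true_and, Bool.and_false, Bool.and_true,
          Bool.not_false, Bool.not_true, Bool.true_or, Bool.or_true, Bool.false_or,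
          Bool.or_false, if_true, if_false, Bool.false_eq_true, Bool.true_eq_false,
          List.getLast?_concat, List.dropLast_concat, ite_true, ite_false]
      · exact Or.inr ⟨by simp, by rw [join_empty_append_singleton],
          by rw [join_empty_append_singleton, isalnum_string_append, ← hseen]; simp [hu, hv]⟩
      · exact Or.inr ⟨by simp, by rw [join_empty_append_singleton],
          by rw [join_empty_append_singleton, isalnum_string_append, ← hseen]; simp [hu, hv]⟩
      · have hj : isalnum_string (PySem.Str.join "" buf) = false := by rw [← hseen, hv]
        simp only [hj, Bool.not_false, if_true]
        exact Or.inr ⟨by simp, by rw [join_empty_append_singleton],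
          by rw [join_empty_append_singleton, isalnum_string_append, ← hseen]; simp [hu, hv]⟩
      · -- alnum unit after an alnum group: new group starts
        rw [← hseen, hv]
        simp only [Bool.not_true, Bool.or_self, Bool.false_or, ite_false, Bool.false_eq_true,
          if_false]
        exact Or.inr ⟨by simp, by rw [join_empty_singleton],
          by rw [join_empty_singleton]; simp [hu]⟩

-- ===== VERDICT (by name: the statement is the Claim_ definition above) =====
theorem merge_non_alphanumeric_spec : Claim_equal_merge_non_alphanumeric := by
  intro units _
  unfold Spec_merge_non_alphanumeric merge_non_alphanumeric merge_non_alphanumeric_alt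
  have h := fold_agree units [] ([], [], false) (Or.inl ⟨rfl, rfl, rfl, rfl⟩)
  rcases h with ⟨hbuf, hout, hacc, -⟩ | ⟨hbuf, hacc, -⟩ <;> simp only [List.isEmpty_iff]
  · rw [hacc, if_pos hbuf, hout]
  · rw [hacc, if_neg hbuf]
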